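-- pv_equiv track=rewrite | github.com/pokemonchw/dieloli | script/Core/ValueHandle.py | getReginList
-- ===== SOURCE A (Python) =====
-- def twoBitArrayToDict(array:tuple) -> dict:
--     '''
--     将二维数组转换为字典
--     Keyword arguments:
--     array -- 要转换的二维数组
--     '''
--     newDict = dict((x, y) for x, y in array)
--     return newDict
--
-- def getReginList(nowData:dict) -> dict:
--     '''
--     按dict中每个value的值对key进行排序，并计算权重区域列表
--     Keyword arguments:
--     nowData -- 需要进行计算权重的dict数据
--     '''
--     regionList = {}
--     sortData = sortedDictForValues(nowData)
--     sortDataKey = list(sortData.keys())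
--     regionIndex = 0
--     for i in range(0,len(sortData)):
--         nowKey = sortDataKey[i]
--         regionIndex = regionIndex + sortData[nowKey]
--         regionList[str(regionIndex)] = nowKey
--     return regionList
--
-- def sortedDictForValues(oldDict):
--     '''
--     按dict中每个value的值对key进行排序生成新dict
--     Keyword arguments:
--     oldDict -- 需要进行排序的数据
--     '''
--     sortData = twoBitArrayToDict(sorted(oldDict.items(),key=lambda x:x[1]))
--     return sortData
-- ===== SOURCE B (Python) =====
-- def getReginList(nowData: dict) -> dict:
--     '''Back-to-front construction: start from the grand total of all weights,
--     walk the value-sorted items in reverse subtracting each weight to get its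
--     region boundary, collect the (boundary, key) pairs, then build the dict
--     from the forward-ordered pair list in one dict() call.'''
--     items = sorted(nowData.items(), key=lambda kv: kv[1])
--     total = sum(value for _, value in items)
--     pairs = []
--     for key, value in reversed(items):
--         pairs.append((str(total), key))
--         total -= value
--     pairs.reverse()
--     return dict(pairs)
-- ===== Notes on version B (the rewrite author's own statement) =====
-- stated objective: alternative
-- what changed: A accumulates region boundaries forward with per-step dict lookups and dict inserts; B computes the grand total of the weights, walks the sorted items in reverse subtracting each weight to obtain its boundary, collects the (boundary, key) pairs back-to-front, and builds the result with a single dict() over the forward pair list.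
import Mathlib
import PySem

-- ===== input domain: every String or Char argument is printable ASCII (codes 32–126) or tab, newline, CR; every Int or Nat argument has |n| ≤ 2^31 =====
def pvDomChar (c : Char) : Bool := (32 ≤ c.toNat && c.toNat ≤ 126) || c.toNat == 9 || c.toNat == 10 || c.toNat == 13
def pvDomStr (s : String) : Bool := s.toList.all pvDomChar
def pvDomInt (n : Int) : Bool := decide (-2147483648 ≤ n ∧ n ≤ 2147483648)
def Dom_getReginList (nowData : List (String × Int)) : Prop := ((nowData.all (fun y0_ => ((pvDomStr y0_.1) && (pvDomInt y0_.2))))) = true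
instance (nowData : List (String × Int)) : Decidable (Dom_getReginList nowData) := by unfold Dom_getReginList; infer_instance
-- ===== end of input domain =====

-- B builds the region list BACK-TO-FRONT: grand total of the weights, reverse walk subtracting
-- each weight to get its boundary, then one dict() of the forward pair list — instead of A's
-- forward accumulating loop with per-step dict lookups and inserts; objective: alternative, same cost.
-- The dict parameter nowData is encoded as its (k, v) pair list; both ports build the dict with
-- PySem.Dict.ofList first, exactly as Python's dict construction (duplicate keys: last value wins).


-- ===== PORT A =====
-- helper twoBitArrayToDict: dict((x, y) for x, y in array)
def twoBitArrayToDict (array : List (String × Int)) : PySem.Dict String Int :=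
  PySem.Dict.ofList array

-- helper sortedDictForValues: twoBitArrayToDict(sorted(oldDict.items(), key=lambda x: x[1]))
def sortedDictForValues (oldDict : PySem.Dict String Int) : PySem.Dict String Int :=
  twoBitArrayToDict (PySem.List.sorted oldDict.items (fun x => x.2) false)

def getReginList (nowData : List (String × Int)) : List (String × String) :=
  let nowDict : PySem.Dict String Int := PySem.Dict.ofList nowData  -- the dict argument
  let sortData := sortedDictForValues nowDict
  let sortDataKey := sortData.keys
  -- for i in range(0, len(sortData)): accumulate regionIndex, regionList[str(regionIndex)] = nowKey
  -- sortDataKey[i] and sortData[nowKey] always succeed (i in range, key taken from the dict),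
  -- so they are ported with the total pyGetD / getD forms.
  let res := (PySem.List.pyRange 0 sortData.size 1).foldl
      (fun st i =>
        let nowKey := PySem.List.pyGetD sortDataKey i ""
        let regionIndex := st.1 + sortData.getD nowKey 0
        (regionIndex, st.2.insert (PySem.Int.toStr regionIndex) nowKey))
      ((0 : Int), (PySem.Dict.empty : PySem.Dict String String))
  res.2.items

-- ===== PORT B =====
def getReginList_alt (nowData : List (String × Int)) : List (String × String) :=
  let items := PySem.List.sorted (PySem.Dict.ofList nowData : PySem.Dict String Int).items
      (fun kv => kv.2) false
  -- total = sum(value for _, value in items)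
  let total := (items.map (fun p => p.2)).sum
  -- for key, value in reversed(items): pairs.append((str(total), key)); total -= value
  let loop := items.reverse.foldl
      (fun st kv => (st.1 - kv.2, st.2 ++ [(PySem.Int.toStr st.1, kv.1)]))
      (total, ([] : List (String × String)))
  -- pairs.reverse(); dict(pairs)
  (PySem.Dict.ofList loop.2.reverse : PySem.Dict String String).items

-- ===== PRECONDITION & SPEC =====
def Spec_getReginList (nowData : List (String × Int)) (out : List (String × String)) : Prop := out = getReginList_alt nowData
instance (nowData : List (String × Int)) (out : List (String × String)) : Decidable (Spec_getReginList nowData out) := by unfold Spec_getReginList; infer_instance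

-- ===== CLAIM (what is proved, stated in full; the proofs are below) =====
def Claim_equal_getReginList : Prop := ∀ (nowData : List (String × Int)), Dom_getReginList nowData → Spec_getReginList nowData (getReginList nowData)

-- ===== LEMMAS AND PROOFS =====

-- A's loop as structural recursion: successive inserts of the running region boundaries
def pvCore : List (String × Int) → Int → PySem.Dict String String → PySem.Dict String String
  | [], _, d => d
  | p :: t, s, d => pvCore t (s + p.2) (d.insert (PySem.Int.toStr (s + p.2)) p.1)

-- the forward (boundary, key) pair list
def pvFwd : List (String × Int) → Int → List (String × String)
  | [], _ => []
  | p :: t, s => (PySem.Int.toStr (s + p.2), p.1) :: pvFwd t (s + p.2)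

theorem pvA_loop (l : List (String × Int)) (s : Int) (d : PySem.Dict String String) :
    (l.foldl (fun st p => (st.1 + p.2, st.2.insert (PySem.Int.toStr (st.1 + p.2)) p.1)) (s, d)).2
      = pvCore l s d := by
  induction l generalizing s d with
  | nil => rfl
  | cons p t ih => simpa [pvCore, List.foldl_cons] using ih (s + p.2) (d.insert (PySem.Int.toStr (s + p.2)) p.1)

-- A's insert loop is building dict(pvFwd …): the same inserts over the forward pair list
theorem pvCore_eq_foldl (l : List (String × Int)) (s : Int) (d : PySem.Dict String String) :
    pvCore l s d = (pvFwd l s).foldl (fun d q => d.insert q.1 q.2) d := by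
  induction l generalizing s d with
  | nil => rfl
  | cons p t ih => simpa [pvCore, pvFwd, List.foldl_cons] using ih (s + p.2) _

-- B's reverse subtracting loop produces exactly the reversed forward pair list
theorem pvB_loop (l : List (String × Int)) (s : Int) (acc : List (String × String)) :
    l.reverse.foldl (fun st kv => (st.1 - kv.2, st.2 ++ [(PySem.Int.toStr st.1, kv.1)]))
        (s + (l.map (fun p => p.2)).sum, acc)
      = (s, acc ++ (pvFwd l s).reverse) := by
  induction l generalizing s acc with
  | nil => simp [pvFwd]
  | cons p t ih =>
      have h := ih (s + p.2) acc
      simp only [List.reverse_cons, List.foldl_append, List.map_cons, List.sum_cons] at h ⊢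
      rw [show s + (p.2 + (t.map (fun p => p.2)).sum) = s + p.2 + (t.map (fun p => p.2)).sum by ring,
        h]
      simp [pvFwd]

-- ===== VERDICT (by name: the statement is the Claim_ definition above) =====
theorem getReginList_spec : Claim_equal_getReginList := by
  intro nowData _
  unfold Spec_getReginList
  simp only [getReginList, getReginList_alt, sortedDictForValues, twoBitArrayToDict]
  set items := PySem.List.sorted (PySem.Dict.ofList nowData : PySem.Dict String Int).items
      (fun x => x.2) false with hitems
  have hnodup : (items.map Prod.fst).Nodup := by
    have hperm : items.Perm (PySem.Dict.ofList nowData : PySem.Dict String Int).items :=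
      PySem.List.sorted_perm _ _ _
    exact ((hperm.map Prod.fst).nodup_iff).mpr (PySem.Dict.nodup_keys_ofList nowData)
  -- sortData rebuilt from the sorted items is exactly the sorted items list
  have hsort : (PySem.Dict.ofList items : PySem.Dict String Int).items = items := by
    have := PySem.Dict.items_foldl_insert_fresh items Prod.fst Prod.snd PySem.Dict.empty
      (fun a _ => by simp [pysem]) hnodup
    simpa [PySem.Dict.ofList] using this
  have hkeys : (PySem.Dict.ofList items : PySem.Dict String Int).keys = items.map Prod.fst := by
    simp [PySem.Dict.keys, hsort]
  have hsize : (PySem.Dict.ofList items : PySem.Dict String Int).size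
      = ((items.map Prod.fst).length : Int) := by
    simp [PySem.Dict.size, hsort]
  have hA := PySem.List.foldl_pyRange_zero_pyGetD' (items.map Prod.fst) ""
      (fun st k => (st.1 + (PySem.Dict.ofList items : PySem.Dict String Int).getD k 0,
        st.2.insert (PySem.Int.toStr (st.1 + (PySem.Dict.ofList items : PySem.Dict String Int).getD k 0)) k))
      ((0 : Int), (PySem.Dict.empty : PySem.Dict String String))
  rw [hkeys, hsize, hA,
    List.foldl_map,
    PySem.List.foldl_congr_mem items _
      (fun st p => (st.1 + p.2, st.2.insert (PySem.Int.toStr (st.1 + p.2)) p.1)) _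
      (fun st p hp => by
        have : (PySem.Dict.ofList items : PySem.Dict String Int).getD p.1 0 = p.2 :=
          PySem.Dict.getD_of_mem_items _ (by rw [hsort]; exact hp) (hkeys ▸ hnodup) 0
        simp [this]),
    pvA_loop, pvCore_eq_foldl]
  have hB := pvB_loop items 0 []
  rw [zero_add] at hB
  rw [hB]
  simp only [List.nil_append, List.reverse_reverse]
  rfl
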